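-- pv_equiv track=rewrite | github.com/srikkanthr-ucd/bugscpp-fork | dataset/localize.py | getInt
-- ===== SOURCE A (Python) =====
-- def getInt(str):
--     found_num = False
--     ret = 0
--     for c in str:
--         isDig = c.isdigit()
--         if isDig and found_num:
--             ret = ret * 10 + int(c)
--         elif isDig and (not found_num):
--             found_num = True
--             ret = ret * 10 + int(c)
--         elif found_num:
--             break
--     return ret
-- ===== SOURCE B (Python) =====
-- def getInt(str):
--     n = len(str)
--     i = 0
--     while i < n and not str[i].isdigit():
--         i += 1
--     j = i
--     while j < n and str[j].isdigit():
--         j += 1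
--     run = str[i:j]
--     return sum((ord(c) - 48) * 10 ** k for k, c in enumerate(reversed(run)))
-- ===== Notes on version B (the rewrite author's own statement) =====
-- stated objective: alternative
-- what changed: Replaces A's single stateful loop (found_num flag, Horner accumulation ret=ret*10+int(c), break) by a two-phase index scan that locates the first digit run [i:j] and then sums its digits with positional powers of ten over the reversed run.
import Mathlib
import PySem

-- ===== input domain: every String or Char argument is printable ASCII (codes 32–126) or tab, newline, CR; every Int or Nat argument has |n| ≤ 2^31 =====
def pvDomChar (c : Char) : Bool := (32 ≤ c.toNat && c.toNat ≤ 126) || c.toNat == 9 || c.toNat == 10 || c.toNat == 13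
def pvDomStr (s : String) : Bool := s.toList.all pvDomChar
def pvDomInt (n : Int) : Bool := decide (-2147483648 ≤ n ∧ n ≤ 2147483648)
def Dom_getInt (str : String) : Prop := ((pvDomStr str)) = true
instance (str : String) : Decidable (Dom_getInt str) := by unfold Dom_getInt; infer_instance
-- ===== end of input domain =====

-- B replaces A's flag-and-break accumulation loop by a two-phase scan that locates the
-- first digit run and sums its digits with positional weights (objective: alternative decomposition).

-- ===== PORT A =====
-- the for-loop with state (found_num, ret); `break` = returning ret.
-- int(c) is only evaluated on branches where c.isdigit() holds; there int(c) = ord(c) - 48 exactly.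
def getIntGo : List Char → Bool → Int → Int
  | [], _, ret => ret
  | c :: rest, found, ret =>
    let isDig := PySem.Chars.isdigit c
    if isDig && found then getIntGo rest found (ret * 10 + ((c.toNat : Int) - 48))
    else if isDig && !found then getIntGo rest true (ret * 10 + ((c.toNat : Int) - 48))
    else if found then ret
    else getIntGo rest found ret

def getInt (str : String) : Int := getIntGo str.toList false 0

-- ===== PORT B =====
-- while i < n and not str[i].isdigit(): i += 1   (str[i] with 0 ≤ i < n is exactly getD)
def getIntAltSkip (cs : List Char) (n i : Nat) : Nat :=
  if _ : i < n ∧ ¬ PySem.Chars.isdigit (cs.getD i ' ') then getIntAltSkip cs n (i + 1) else i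
termination_by n - i

-- while j < n and str[j].isdigit(): j += 1
def getIntAltTake (cs : List Char) (n j : Nat) : Nat :=
  if _ : j < n ∧ PySem.Chars.isdigit (cs.getD j ' ') then getIntAltTake cs n (j + 1) else j
termination_by n - j

def getInt_alt (str : String) : Int :=
  let cs := str.toList
  let n := cs.length
  let i := getIntAltSkip cs n 0
  let j := getIntAltTake cs n i
  let run := (cs.drop i).take (j - i)   -- str[i:j], here 0 ≤ i ≤ j ≤ n so slicing is drop/take
  ((PySem.List.enumerate run.reverse).map
      (fun kc => ((kc.2.toNat : Int) - 48) * 10 ^ kc.1.toNat)).sum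

-- ===== PRECONDITION & SPEC =====
def Spec_getInt (str : String) (out : Int) : Prop := out = getInt_alt str
instance (str : String) (out : Int) : Decidable (Spec_getInt str out) := by unfold Spec_getInt; infer_instance

-- ===== CLAIM (what is proved, stated in full; the proofs are below) =====
def Claim_equal_getInt : Prop := ∀ (str : String), Dom_getInt str → Spec_getInt str (getInt str)

-- ===== LEMMAS AND PROOFS =====

theorem skip_spec (cs : List Char) (i : Nat) (hi : i ≤ cs.length) :
    getIntAltSkip cs cs.length i
      = i + ((cs.drop i).takeWhile (fun c => !PySem.Chars.isdigit c)).length := by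
  induction hk : cs.length - i generalizing i with
  | zero =>
    have hlen : i = cs.length := by omega
    rw [getIntAltSkip]
    simp [hlen]
  | succ k ih =>
    have hi' : i < cs.length := by omega
    have hget : cs.getD i ' ' = cs[i] := List.getD_eq_getElem cs ' ' hi'
    have hdrop : cs.drop i = cs[i] :: cs.drop (i + 1) := (List.getElem_cons_drop hi').symm
    rw [getIntAltSkip, hget]
    by_cases hd : PySem.Chars.isdigit cs[i]
    · rw [dif_neg (by simp [hd])]
      rw [hdrop, List.takeWhile_cons]
      simp [hd]
    · rw [dif_pos ⟨hi', by simp [hd]⟩]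
      rw [ih (i + 1) (by omega) (by omega)]
      rw [hdrop, List.takeWhile_cons]
      simp [hd]
      omega

theorem take_spec (cs : List Char) (i : Nat) (hi : i ≤ cs.length) :
    getIntAltTake cs cs.length i
      = i + ((cs.drop i).takeWhile PySem.Chars.isdigit).length := by
  induction hk : cs.length - i generalizing i with
  | zero =>
    have hlen : i = cs.length := by omega
    rw [getIntAltTake]
    simp [hlen]
  | succ k ih =>
    have hi' : i < cs.length := by omega
    have hget : cs.getD i ' ' = cs[i] := List.getD_eq_getElem cs ' ' hi'
    have hdrop : cs.drop i = cs[i] :: cs.drop (i + 1) := (List.getElem_cons_drop hi').symm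
    rw [getIntAltTake, hget]
    by_cases hd : PySem.Chars.isdigit cs[i]
    · rw [dif_pos ⟨hi', hd⟩]
      rw [ih (i + 1) (by omega) (by omega)]
      rw [hdrop, List.takeWhile_cons]
      simp [hd]
      omega
    · rw [dif_neg (by simp [hd])]
      rw [hdrop, List.takeWhile_cons]
      simp [hd]

-- the digit-accumulation step shared by the characterizations
def pvStep (a : Int) (c : Char) : Int := a * 10 + ((c.toNat : Int) - 48)

theorem A_skip (cs : List Char) :
    getIntGo cs false 0 = getIntGo (cs.dropWhile (fun c => !PySem.Chars.isdigit c)) false 0 := by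
  induction cs with
  | nil => rfl
  | cons c rest ih =>
    by_cases hd : PySem.Chars.isdigit c
    · simp [hd]
    · rw [List.dropWhile_cons]
      simp only [hd, Bool.not_false, if_pos]
      rw [← ih]
      simp [getIntGo, hd]

theorem A_acc (cs : List Char) (ret : Int) :
    getIntGo cs true ret = (cs.takeWhile PySem.Chars.isdigit).foldl pvStep ret := by
  induction cs generalizing ret with
  | nil => rfl
  | cons c rest ih =>
    by_cases hd : PySem.Chars.isdigit c
    · rw [List.takeWhile_cons]
      simp only [hd, if_pos]
      rw [List.foldl_cons, ← ih]
      simp [getIntGo, hd, pvStep]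
    · rw [List.takeWhile_cons]
      simp only [hd]
      simp [getIntGo, hd]

theorem shift_sum (r : List Char) (s : Int) (hs : 0 ≤ s) :
    ((PySem.List.enumerate r (s + 1)).map
        (fun kc : Int × Char => ((kc.2.toNat : Int) - 48) * 10 ^ kc.1.toNat)).sum
      = 10 * ((PySem.List.enumerate r s).map
        (fun kc : Int × Char => ((kc.2.toNat : Int) - 48) * 10 ^ kc.1.toNat)).sum := by
  induction r generalizing s with
  | nil => simp [PySem.List.enumerate_nil]
  | cons c rest ih =>
    rw [PySem.List.enumerate_cons, PySem.List.enumerate_cons]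
    simp only [List.map_cons, List.sum_cons]
    rw [ih (s + 1) (by omega)]
    have hpow : (s + 1).toNat = s.toNat + 1 := by omega
    rw [hpow, pow_succ]
    ring

theorem pos_sum (ds : List Char) :
    ((PySem.List.enumerate ds.reverse).map
        (fun kc : Int × Char => ((kc.2.toNat : Int) - 48) * 10 ^ kc.1.toNat)).sum
      = ds.foldl pvStep 0 := by
  induction ds using List.reverseRecOn with
  | nil => simp [PySem.List.enumerate_nil]
  | append_singleton ds c ih =>
    rw [List.reverse_append, List.reverse_singleton, List.singleton_append,
        PySem.List.enumerate_cons, List.map_cons, List.sum_cons,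
        shift_sum ds.reverse 0 le_rfl, ih, List.foldl_append]
    simp [pvStep]
    ring

-- A's loop equals a Horner fold over the first digit run
theorem A_run (cs : List Char) :
    getIntGo cs false 0
      = ((cs.dropWhile (fun c => !PySem.Chars.isdigit c)).takeWhile
          PySem.Chars.isdigit).foldl pvStep 0 := by
  rw [A_skip]
  cases hds : cs.dropWhile (fun c => !PySem.Chars.isdigit c) with
  | nil => rfl
  | cons c rest =>
    have hd : PySem.Chars.isdigit c := by
      have := List.head_dropWhile_not (fun c => !PySem.Chars.isdigit c) (l := cs)
      rw [hds] at this
      simpa using this (by simp)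
    rw [List.takeWhile_cons]
    simp only [hd, if_pos]
    rw [List.foldl_cons, ← A_acc]
    simp [getIntGo, hd, pvStep]

-- B's run is the first digit run
theorem B_run (cs : List Char) :
    ((cs.drop (getIntAltSkip cs cs.length 0)).take
        (getIntAltTake cs cs.length (getIntAltSkip cs cs.length 0)
          - getIntAltSkip cs cs.length 0))
      = (cs.dropWhile (fun c => !PySem.Chars.isdigit c)).takeWhile PySem.Chars.isdigit := by
  have hi := skip_spec cs 0 (Nat.zero_le _)
  rw [List.drop_zero, Nat.zero_add] at hi
  have hdropi : cs.drop (getIntAltSkip cs cs.length 0)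
      = cs.dropWhile (fun c => !PySem.Chars.isdigit c) := by
    rw [hi]
    calc cs.drop (cs.takeWhile (fun c => !PySem.Chars.isdigit c)).length
        = (cs.takeWhile (fun c => !PySem.Chars.isdigit c)
            ++ cs.dropWhile (fun c => !PySem.Chars.isdigit c)).drop
              (cs.takeWhile (fun c => !PySem.Chars.isdigit c)).length := by
          rw [List.takeWhile_append_dropWhile]
      _ = cs.dropWhile (fun c => !PySem.Chars.isdigit c) := List.drop_left
  have hile : getIntAltSkip cs cs.length 0 ≤ cs.length := by
    rw [hi]
    exact (List.takeWhile_prefix _).length_le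
  have hj := take_spec cs (getIntAltSkip cs cs.length 0) hile
  rw [hj, Nat.add_sub_cancel_left, hdropi]
  set r := cs.dropWhile (fun c => !PySem.Chars.isdigit c) with hr
  calc r.take (r.takeWhile PySem.Chars.isdigit).length
      = (r.takeWhile PySem.Chars.isdigit ++ r.dropWhile PySem.Chars.isdigit).take
          (r.takeWhile PySem.Chars.isdigit).length := by
        rw [List.takeWhile_append_dropWhile]
    _ = r.takeWhile PySem.Chars.isdigit := List.take_left

-- ===== VERDICT (by name: the statement is the Claim_ definition above) =====
theorem getInt_spec : Claim_equal_getInt := by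
  intro str _
  unfold Spec_getInt getInt getInt_alt
  dsimp only
  rw [B_run, pos_sum, A_run]
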